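-- pv_equiv track=rewrite | github.com/OriWeiss/Sickle-Cell-Anemia-Detection | src/FeatureExtraction.py | extract_area_perim
-- ===== SOURCE A (Python) =====
-- def numofneighbour(mat, i, j, searchValue):
--     count = 0;
--
--     # UP
--     if (i > 0 and mat[i - 1][j] == searchValue):
--         count += 1;
--
--         # LEFT
--     if (j > 0 and mat[i][j - 1] == searchValue):
--         count += 1;
--
--         # DOWN
--     if (i < len(mat) - 1 and mat[i + 1][j] == searchValue):
--         count += 1
--
--     # RIGHT
--     if (j < len(mat[i]) - 1 and mat[i][j + 1] == searchValue):
--         count += 1;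
--
--     return count;
--
-- def findperimeter(mat, num_features):
--     perimeter = [0] * (num_features+1)
--
--     # Traversing the matrix and finding ones to
--     # calculate their contribution.
--     for i in range(len(mat)):
--         for j in range(0, len(mat[i])):
--             if (mat[i][j] != 0):
--                 perimeter[mat[i][j]] += (4 - numofneighbour(mat, i, j, mat[i][j]))
--
--     return perimeter
--
-- def extract_area_perim(img,num_features):
--     area = [0] * (num_features+1)
--     for i in range(len(img)):
--         for j in range(len(img[i])):
--             value = img[i][j]
--             if(value != 0):
--                 area[value]+=1
--     return area, findperimeter(img,num_features)
-- ===== SOURCE B (Python) =====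
-- def extract_area_perim(img, num_features):
--     m = num_features + 1
--     area = [0] * m
--     pairs = [0] * m
--     nrows = len(img)
--     for i in range(nrows):
--         row = img[i]
--         for j in range(len(row)):
--             v = row[j]
--             if v != 0:
--                 area[v] += 1
--                 if j + 1 < len(row) and row[j + 1] == v:
--                     pairs[v] += 1
--                 if i + 1 < nrows and j < len(img[i + 1]) and img[i + 1][j] == v:
--                     pairs[v] += 1
--     perimeter = [4 * a - 2 * p for a, p in zip(area, pairs)]
--     return area, perimeter
-- ===== Notes on version B (the rewrite author's own statement) =====
-- stated objective: alternative
-- what changed: B replaces A's per-cell scan of all four neighbours (a second full pass calling numofneighbour per nonzero cell) by a single pass that counts each same-label right/down adjacent pair once and recovers every perimeter as 4*area - 2*pairs.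
import Mathlib
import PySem

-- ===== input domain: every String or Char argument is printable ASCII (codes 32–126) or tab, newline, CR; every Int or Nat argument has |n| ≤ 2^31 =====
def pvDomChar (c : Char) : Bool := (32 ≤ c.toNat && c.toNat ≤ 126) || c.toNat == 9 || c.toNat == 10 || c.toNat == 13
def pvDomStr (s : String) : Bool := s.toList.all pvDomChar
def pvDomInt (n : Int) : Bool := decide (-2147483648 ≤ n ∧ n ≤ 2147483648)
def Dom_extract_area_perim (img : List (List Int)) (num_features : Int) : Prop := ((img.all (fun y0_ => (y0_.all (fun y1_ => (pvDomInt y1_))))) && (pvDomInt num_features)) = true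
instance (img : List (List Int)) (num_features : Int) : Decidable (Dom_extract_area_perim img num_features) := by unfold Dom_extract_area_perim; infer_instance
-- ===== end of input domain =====

-- B replaces A's per-cell 4-neighbour perimeter scan by a single right/down adjacent-pair
-- count per label, recovering each perimeter as 4*area - 2*pairs (objective: alternative).

-- shared Python statement `lst[v] += d` (negative v indexes from the end; out-of-range
-- IndexError is excluded by Pre_, where this total form returns lst unchanged)
def pyAddAt (l : List Int) (v d : Int) : List Int :=
  PySem.List.pySetD l v (PySem.List.pyGetD l v 0 + d)

-- ===== PORT A =====
-- row accesses use List.getD; within Pre_ every access Python performs is in range,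
-- so the default is never the value Python reads (out-of-range j in a neighbouring
-- row is a Python IndexError, excluded by Pre_)
def numofneighbour (mat : List (List Int)) (i j : Nat) (searchValue : Int) : Int :=
  ((((0 : Int)
    + (if 0 < i ∧ (mat.getD (i-1) []).getD j 0 = searchValue then 1 else 0))
    + (if 0 < j ∧ (mat.getD i []).getD (j-1) 0 = searchValue then 1 else 0))
    + (if i < mat.length - 1 ∧ (mat.getD (i+1) []).getD j 0 = searchValue then 1 else 0))
    + (if j < (mat.getD i []).length - 1 ∧ (mat.getD i []).getD (j+1) 0 = searchValue then 1 else 0)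

def findperimeter (mat : List (List Int)) (num_features : Int) : List Int :=
  (List.range mat.length).foldl (fun per i =>
    (List.range (mat.getD i []).length).foldl (fun per j =>
      let v := (mat.getD i []).getD j 0
      if v ≠ 0 then pyAddAt per v (4 - numofneighbour mat i j v) else per) per)
    (List.replicate (num_features + 1).toNat 0)

def extract_area_perim (img : List (List Int)) (num_features : Int) : List Int × List Int :=
  let area := (List.range img.length).foldl (fun area i =>
    (List.range (img.getD i []).length).foldl (fun area j =>
      let v := (img.getD i []).getD j 0
      if v ≠ 0 then pyAddAt area v 1 else area) area)
    (List.replicate (num_features + 1).toNat 0)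
  (area, findperimeter img num_features)

-- ===== PORT B =====
def extract_area_perim_alt (img : List (List Int)) (num_features : Int) : List Int × List Int :=
  let m := (num_features + 1).toNat
  let nrows := img.length
  let st := (List.range nrows).foldl (fun st i =>
    let row := img.getD i []
    (List.range row.length).foldl (fun st j =>
      let v := row.getD j 0
      if v ≠ 0 then
        (pyAddAt st.1 v 1,
         let p := if j + 1 < row.length ∧ row.getD (j+1) 0 = v then pyAddAt st.2 v 1 else st.2
         if i + 1 < nrows ∧ j < (img.getD (i+1) []).length ∧ (img.getD (i+1) []).getD j 0 = v
           then pyAddAt p v 1 else p)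
      else st) st)
    (List.replicate m 0, List.replicate m 0)
  (st.1, List.zipWith (fun a p => 4 * a - 2 * p) st.1 st.2)

-- ===== PRECONDITION & SPEC =====
-- Pre_ is exactly the set of inputs on which the Python A returns: every nonzero label must be
-- a valid (possibly negative) index into the length-(num_features+1) result lists, and no
-- nonzero cell may look up a column that a neighbouring (ragged) row is too short to have —
-- on both kinds of excluded input Python A raises IndexError.
def Pre_extract_area_perim (img : List (List Int)) (num_features : Int) : Prop :=
  (∀ r ∈ img, ∀ v ∈ r, v ≠ 0 →
      -(((num_features + 1).toNat : Int)) ≤ v ∧ v < ((num_features + 1).toNat : Int)) ∧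
  (∀ i < img.length, ∀ j < (img.getD i []).length, (img.getD i []).getD j 0 ≠ 0 →
      (0 < i → j < (img.getD (i-1) []).length) ∧
      (i + 1 < img.length → j < (img.getD (i+1) []).length))
instance (img : List (List Int)) (num_features : Int) : Decidable (Pre_extract_area_perim img num_features) := by
  unfold Pre_extract_area_perim; infer_instance

def pvWitness_extract_area_perim : List (List Int) × Int := ([[1, 1, 0], [0, 1, 2]], 2)

def Spec_extract_area_perim (img : List (List Int)) (num_features : Int) (out : List Int × List Int) : Prop := out = extract_area_perim_alt img num_features
instance (img : List (List Int)) (num_features : Int) (out : List Int × List Int) : Decidable (Spec_extract_area_perim img num_features out) := by unfold Spec_extract_area_perim; infer_instance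

-- ===== CLAIM (what is proved, stated in full; the proofs are below) =====
def Claim_equal_extract_area_perim : Prop := ∀ (img : List (List Int)) (num_features : Int), Dom_extract_area_perim img num_features → Pre_extract_area_perim img num_features → Spec_extract_area_perim img num_features (extract_area_perim img num_features)


-- ===== LEMMAS AND PROOFS =====

-- normalised Nat index of the Python index v into a list of length n (valid v only)
def idxN (n : Nat) (v : Int) : Nat := if 0 ≤ v then v.toNat else n - (-v).toNat

abbrev rowOf (g : List (List Int)) (i : Nat) : List Int := g.getD i []
abbrev valOf (g : List (List Int)) (i j : Nat) : Int := (rowOf g i).getD j 0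

lemma valOf_ne_zero_lt {g : List (List Int)} {i j : Nat} (h : valOf g i j ≠ 0) :
    j < (rowOf g i).length := by
  by_contra hj
  exact h (List.getD_eq_default _ _ (le_of_not_gt hj))

lemma idxN_lt {n : Nat} {v : Int} (h : -(n : Int) ≤ v ∧ v < (n : Int)) : idxN n v < n := by
  unfold idxN; split_ifs with h0 <;> omega

lemma pyAddAt_length {l : List Int} {v d : Int}
    (h : -((l.length : Nat) : Int) ≤ v ∧ v < ((l.length : Nat) : Int)) :
    (pyAddAt l v d).length = l.length := by
  unfold pyAddAt PySem.List.pySetD PySem.List.pySet? PySem.List.pyIdx?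
  split_ifs <;> simp_all

lemma pyAddAt_getD {l : List Int} {v d : Int}
    (h : -((l.length : Nat) : Int) ≤ v ∧ v < ((l.length : Nat) : Int))
    (k : Nat) (hk : k < l.length) :
    (pyAddAt l v d).getD k 0 = l.getD k 0 + (if idxN l.length v = k then d else 0) := by
  have hidx : PySem.List.pyIdx? l.length v = some (idxN l.length v) := by
    unfold PySem.List.pyIdx? idxN; split_ifs <;> simp_all
  have hlt : idxN l.length v < l.length := idxN_lt h
  unfold pyAddAt PySem.List.pySetD PySem.List.pySet? PySem.List.pyGetD PySem.List.pyGet?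
  rw [hidx]
  simp only [Option.bind_some, Option.map_some, Option.getD_some, List.getD,
    List.getElem?_set]
  split_ifs with he
  · subst he
    simp [hlt]
  · simp

-- characterisation of a foldl over List.range L whose step adds c k j at index k
lemma rangeFold_getD {m : Nat} (L : Nat) (u : List Int → Nat → List Int) (c : Nat → Nat → Int)
    (hlen : ∀ acc j, acc.length = m → j < L → (u acc j).length = m)
    (hget : ∀ acc j, acc.length = m → j < L → ∀ k, k < m →
      (u acc j).getD k 0 = acc.getD k 0 + c k j)
    (acc : List Int) (hacc : acc.length = m) :
    ((List.range L).foldl u acc).length = m ∧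
    ∀ k, k < m → ((List.range L).foldl u acc).getD k 0
      = acc.getD k 0 + ∑ j ∈ Finset.range L, c k j := by
  induction L with
  | zero => exact ⟨hacc, fun k _ => by simp⟩
  | succ t ih =>
    have ih' := ih (fun a j ha hj => hlen a j ha (Nat.lt_succ_of_lt hj))
      (fun a j ha hj => hget a j ha (Nat.lt_succ_of_lt hj))
    rw [List.range_succ, List.foldl_append]
    refine ⟨?_, ?_⟩
    · exact hlen _ t (ih'.1) (Nat.lt_succ_self t)
    · intro k hk
      rw [List.foldl_cons, List.foldl_nil,
        hget _ t ih'.1 (Nat.lt_succ_self t) k hk, ih'.2 k hk, Finset.sum_range_succ]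
      ring

lemma sum_indicator_range_eq {L1 L2 : Nat} {f : Nat → Int}
    (h : ∀ j, f j ≠ 0 → j < L1 ∧ j < L2) :
    ∑ j ∈ Finset.range L1, f j = ∑ j ∈ Finset.range L2, f j := by
  have h1 : ∀ L, L ≤ max L1 L2 → (∀ j, f j ≠ 0 → j < L) →
      ∑ j ∈ Finset.range L, f j = ∑ j ∈ Finset.range (max L1 L2), f j := by
    intro L hL hf
    refine Finset.sum_subset (by intro x hx; simp only [Finset.mem_range] at hx ⊢; omega) ?_
    intro x _ hx
    by_contra hne
    exact hx (Finset.mem_range.2 (hf x hne))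
  rw [h1 L1 (le_max_left _ _) (fun j hj => (h j hj).1),
    h1 L2 (le_max_right _ _) (fun j hj => (h j hj).2)]

lemma shift_row (L : Nat) (H : Nat → Prop) [DecidablePred H] (hH : ∀ j, H j → j + 1 < L) :
    ∑ j ∈ Finset.range L, (if 0 < j ∧ H (j-1) then (1:Int) else 0)
      = ∑ j ∈ Finset.range L, (if H j then (1:Int) else 0) := by
  cases L with
  | zero => rfl
  | succ t =>
    rw [Finset.sum_range_succ' (fun j => if 0 < j ∧ H (j-1) then (1:Int) else 0) t,
      Finset.sum_range_succ (fun j => if H j then (1:Int) else 0) t]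
    have ht : ¬ H t := fun h => absurd (hH t h) (lt_irrefl _)
    simp [ht]


lemma val_bounds {g : List (List Int)} {m : Nat}
    (hlab : ∀ r ∈ g, ∀ v ∈ r, v ≠ 0 → -((m : Nat) : Int) ≤ v ∧ v < ((m : Nat) : Int)) :
    ∀ i j, valOf g i j ≠ 0 → -((m : Nat) : Int) ≤ valOf g i j ∧ valOf g i j < ((m : Nat) : Int) := by
  intro i j hne
  have hj := valOf_ne_zero_lt hne
  have hi : i < g.length := by
    by_contra h
    rw [rowOf, List.getD_eq_default _ _ (le_of_not_gt h)] at hj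
    exact absurd hj (by simp)
  have hrow : rowOf g i ∈ g := by
    rw [rowOf, List.getD_eq_getElem _ _ hi]; exact List.getElem_mem hi
  have hvmem : valOf g i j ∈ rowOf g i := by
    rw [valOf, List.getD_eq_getElem _ _ hj]; exact List.getElem_mem hj
  exact hlab _ hrow _ hvmem hne

lemma cellStep_len {m : Nat} {acc : List Int} {v d : Int} (hacc : acc.length = m)
    (hv : v ≠ 0 → -((m : Nat) : Int) ≤ v ∧ v < ((m : Nat) : Int)) :
    (if v ≠ 0 then pyAddAt acc v d else acc).length = m := by
  split_ifs with h
  · rw [pyAddAt_length (by rw [hacc]; exact hv h)]; exact hacc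
  · exact hacc

lemma cellStep_getD {m : Nat} {acc : List Int} {v d : Int} (hacc : acc.length = m)
    (hv : v ≠ 0 → -((m : Nat) : Int) ≤ v ∧ v < ((m : Nat) : Int)) (k : Nat) (hk : k < m) :
    (if v ≠ 0 then pyAddAt acc v d else acc).getD k 0
      = acc.getD k 0 + (if v ≠ 0 ∧ idxN m v = k then d else 0) := by
  by_cases h1 : v ≠ 0
  · rw [if_pos h1, pyAddAt_getD (by rw [hacc]; exact hv h1) k (by omega), hacc]
    by_cases h2 : idxN m v = k
    · rw [if_pos h2, if_pos ⟨h1, h2⟩]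
    · rw [if_neg h2, if_neg (by tauto)]
  · rw [if_neg h1, if_neg (by tauto), add_zero]

-- characterisation of A's nested grid fold (area and perimeter both have this shape)
lemma gridA_char (g : List (List Int)) (m : Nat) (w : Nat → Nat → Int)
    (hv : ∀ i j, valOf g i j ≠ 0 → -((m : Nat) : Int) ≤ valOf g i j ∧ valOf g i j < ((m : Nat) : Int)) :
    ((List.range g.length).foldl (fun acc i =>
      (List.range (g.getD i []).length).foldl (fun acc j =>
        let v := (g.getD i []).getD j 0
        if v ≠ 0 then pyAddAt acc v (w i j) else acc) acc)
      (List.replicate m 0)).length = m ∧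
    ∀ k, k < m → ((List.range g.length).foldl (fun acc i =>
      (List.range (g.getD i []).length).foldl (fun acc j =>
        let v := (g.getD i []).getD j 0
        if v ≠ 0 then pyAddAt acc v (w i j) else acc) acc)
      (List.replicate m 0)).getD k 0
      = ∑ i ∈ Finset.range g.length, ∑ j ∈ Finset.range ((g.getD i []).length),
          (if valOf g i j ≠ 0 ∧ idxN m (valOf g i j) = k then w i j else 0) := by
  have inner : ∀ i, i < g.length → ∀ (acc : List Int), acc.length = m →
      (((List.range (g.getD i []).length).foldl (fun acc j =>
        let v := (g.getD i []).getD j 0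
        if v ≠ 0 then pyAddAt acc v (w i j) else acc) acc).length = m ∧
      ∀ k, k < m → ((List.range (g.getD i []).length).foldl (fun acc j =>
        let v := (g.getD i []).getD j 0
        if v ≠ 0 then pyAddAt acc v (w i j) else acc) acc).getD k 0
        = acc.getD k 0 + ∑ j ∈ Finset.range ((g.getD i []).length),
            (if valOf g i j ≠ 0 ∧ idxN m (valOf g i j) = k then w i j else 0)) := by
    intro i _ acc hacc
    exact rangeFold_getD ((g.getD i []).length)
      (fun acc j => let v := (g.getD i []).getD j 0
        if v ≠ 0 then pyAddAt acc v (w i j) else acc)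
      (fun k j => if valOf g i j ≠ 0 ∧ idxN m (valOf g i j) = k then w i j else 0)
      (fun a j ha _ => cellStep_len (v := (g.getD i []).getD j 0) (d := w i j) ha (hv i j))
      (fun a j ha _ k hk => cellStep_getD (v := (g.getD i []).getD j 0) (d := w i j) ha (hv i j) k hk)
      acc hacc
  have main := rangeFold_getD g.length
    (fun acc i => (List.range (g.getD i []).length).foldl (fun acc j =>
        let v := (g.getD i []).getD j 0
        if v ≠ 0 then pyAddAt acc v (w i j) else acc) acc)
    (fun k i => ∑ j ∈ Finset.range ((g.getD i []).length),
        (if valOf g i j ≠ 0 ∧ idxN m (valOf g i j) = k then w i j else 0))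
    (fun acc i ha hi => (inner i hi acc ha).1)
    (fun acc i ha hi k hk => (inner i hi acc ha).2 k hk)
    (List.replicate m 0) (by simp)
  refine ⟨main.1, fun k hk => ?_⟩
  rw [main.2 k hk]
  simp


lemma pairStep_len {m : Nat} {acc : List Int} {v : Int} (r dn : Prop) [Decidable r] [Decidable dn]
    (hacc : acc.length = m)
    (hv : v ≠ 0 → -((m : Nat) : Int) ≤ v ∧ v < ((m : Nat) : Int)) :
    (if v ≠ 0 then (if dn then pyAddAt (if r then pyAddAt acc v 1 else acc) v 1
        else (if r then pyAddAt acc v 1 else acc)) else acc).length = m := by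
  by_cases h1 : v ≠ 0
  · have hb := hv h1
    rw [if_pos h1]
    set w := if r then pyAddAt acc v 1 else acc with hw
    have l1 : w.length = m := by
      rw [hw]; split_ifs
      · rw [pyAddAt_length (by rw [hacc]; exact hb)]; exact hacc
      · exact hacc
    split_ifs
    · rw [pyAddAt_length (by rw [l1]; exact hb)]; exact l1
    · exact l1
  · rw [if_neg h1]; exact hacc

lemma pairStep_getD {m : Nat} {acc : List Int} {v : Int} (r dn : Prop) [Decidable r] [Decidable dn]
    (hacc : acc.length = m)
    (hv : v ≠ 0 → -((m : Nat) : Int) ≤ v ∧ v < ((m : Nat) : Int)) (k : Nat) (hk : k < m) :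
    (if v ≠ 0 then (if dn then pyAddAt (if r then pyAddAt acc v 1 else acc) v 1
        else (if r then pyAddAt acc v 1 else acc)) else acc).getD k 0
      = acc.getD k 0 + (if v ≠ 0 ∧ idxN m v = k
          then ((if r then (1:Int) else 0) + (if dn then (1:Int) else 0)) else 0) := by
  by_cases h1 : v ≠ 0
  · have hb := hv h1
    rw [if_pos h1]
    set w := if r then pyAddAt acc v 1 else acc with hw
    have l1 : w.length = m := by
      rw [hw]; split_ifs
      · rw [pyAddAt_length (by rw [hacc]; exact hb)]; exact hacc
      · exact hacc
    have g1 : w.getD k 0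
        = acc.getD k 0 + (if idxN m v = k then (if r then (1:Int) else 0) else 0) := by
      rw [hw]; split_ifs with hr hi hi
      · rw [pyAddAt_getD (by rw [hacc]; exact hb) k (by omega), hacc, if_pos hi]
      · rw [pyAddAt_getD (by rw [hacc]; exact hb) k (by omega), hacc, if_neg hi]
      · ring
      · ring
    have g2 : (if dn then pyAddAt w v 1 else w).getD k 0
        = w.getD k 0 + (if idxN m v = k then (if dn then (1:Int) else 0) else 0) := by
      split_ifs with hd hi hi
      · rw [pyAddAt_getD (by rw [l1]; exact hb) k (by omega), l1, if_pos hi]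
      · rw [pyAddAt_getD (by rw [l1]; exact hb) k (by omega), l1, if_neg hi]
      · ring
      · ring
    rw [g2, g1]
    by_cases hi : idxN m v = k
    · have hc : v ≠ 0 ∧ idxN m v = k := ⟨h1, hi⟩
      rw [if_pos hi, if_pos hi, if_pos hc]; ring
    · have hc : ¬(v ≠ 0 ∧ idxN m v = k) := by tauto
      rw [if_neg hi, if_neg hi, if_neg hc]; ring
  · rw [if_neg h1, if_neg (by tauto), add_zero]

-- characterisation of B's pairs fold
lemma gridP_char (g : List (List Int)) (m : Nat)
    (hv : ∀ i j, valOf g i j ≠ 0 → -((m : Nat) : Int) ≤ valOf g i j ∧ valOf g i j < ((m : Nat) : Int)) :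
    ((List.range g.length).foldl (fun acc i =>
      (List.range (g.getD i []).length).foldl (fun acc j =>
        let v := (g.getD i []).getD j 0
        if v ≠ 0 then
          (if i + 1 < g.length ∧ j < (g.getD (i+1) []).length ∧ (g.getD (i+1) []).getD j 0 = v
            then pyAddAt (if j + 1 < (g.getD i []).length ∧ (g.getD i []).getD (j+1) 0 = v
              then pyAddAt acc v 1 else acc) v 1
            else (if j + 1 < (g.getD i []).length ∧ (g.getD i []).getD (j+1) 0 = v
              then pyAddAt acc v 1 else acc))
        else acc) acc)
      (List.replicate m 0)).length = m ∧
    ∀ k, k < m → ((List.range g.length).foldl (fun acc i =>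
      (List.range (g.getD i []).length).foldl (fun acc j =>
        let v := (g.getD i []).getD j 0
        if v ≠ 0 then
          (if i + 1 < g.length ∧ j < (g.getD (i+1) []).length ∧ (g.getD (i+1) []).getD j 0 = v
            then pyAddAt (if j + 1 < (g.getD i []).length ∧ (g.getD i []).getD (j+1) 0 = v
              then pyAddAt acc v 1 else acc) v 1
            else (if j + 1 < (g.getD i []).length ∧ (g.getD i []).getD (j+1) 0 = v
              then pyAddAt acc v 1 else acc))
        else acc) acc)
      (List.replicate m 0)).getD k 0
      = ∑ i ∈ Finset.range g.length, ∑ j ∈ Finset.range ((g.getD i []).length),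
          (if valOf g i j ≠ 0 ∧ idxN m (valOf g i j) = k
            then ((if j + 1 < (g.getD i []).length ∧ (g.getD i []).getD (j+1) 0 = valOf g i j
                    then (1:Int) else 0)
                + (if i + 1 < g.length ∧ j < (g.getD (i+1) []).length ∧ (g.getD (i+1) []).getD j 0 = valOf g i j
                    then (1:Int) else 0)) else 0) := by
  have inner : ∀ i, i < g.length → ∀ (acc : List Int), acc.length = m →
      (((List.range (g.getD i []).length).foldl (fun acc j =>
        let v := (g.getD i []).getD j 0
        if v ≠ 0 then
          (if i + 1 < g.length ∧ j < (g.getD (i+1) []).length ∧ (g.getD (i+1) []).getD j 0 = v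
            then pyAddAt (if j + 1 < (g.getD i []).length ∧ (g.getD i []).getD (j+1) 0 = v
              then pyAddAt acc v 1 else acc) v 1
            else (if j + 1 < (g.getD i []).length ∧ (g.getD i []).getD (j+1) 0 = v
              then pyAddAt acc v 1 else acc))
        else acc) acc).length = m ∧
      ∀ k, k < m → ((List.range (g.getD i []).length).foldl (fun acc j =>
        let v := (g.getD i []).getD j 0
        if v ≠ 0 then
          (if i + 1 < g.length ∧ j < (g.getD (i+1) []).length ∧ (g.getD (i+1) []).getD j 0 = v
            then pyAddAt (if j + 1 < (g.getD i []).length ∧ (g.getD i []).getD (j+1) 0 = v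
              then pyAddAt acc v 1 else acc) v 1
            else (if j + 1 < (g.getD i []).length ∧ (g.getD i []).getD (j+1) 0 = v
              then pyAddAt acc v 1 else acc))
        else acc) acc).getD k 0
        = acc.getD k 0 + ∑ j ∈ Finset.range ((g.getD i []).length),
          (if valOf g i j ≠ 0 ∧ idxN m (valOf g i j) = k
            then ((if j + 1 < (g.getD i []).length ∧ (g.getD i []).getD (j+1) 0 = valOf g i j
                    then (1:Int) else 0)
                + (if i + 1 < g.length ∧ j < (g.getD (i+1) []).length ∧ (g.getD (i+1) []).getD j 0 = valOf g i j
                    then (1:Int) else 0)) else 0)) := by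
    intro i _ acc hacc
    exact rangeFold_getD ((g.getD i []).length) _ _
      (fun a j ha _ => pairStep_len (v := (g.getD i []).getD j 0)
        (j + 1 < (g.getD i []).length ∧ (g.getD i []).getD (j+1) 0 = (g.getD i []).getD j 0)
        (i + 1 < g.length ∧ j < (g.getD (i+1) []).length ∧ (g.getD (i+1) []).getD j 0 = (g.getD i []).getD j 0)
        ha (hv i j))
      (fun a j ha _ k hk => pairStep_getD (v := (g.getD i []).getD j 0)
        (j + 1 < (g.getD i []).length ∧ (g.getD i []).getD (j+1) 0 = (g.getD i []).getD j 0)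
        (i + 1 < g.length ∧ j < (g.getD (i+1) []).length ∧ (g.getD (i+1) []).getD j 0 = (g.getD i []).getD j 0)
        ha (hv i j) k hk)
      acc hacc
  have main := rangeFold_getD g.length _
    (fun k i => ∑ j ∈ Finset.range ((g.getD i []).length),
          (if valOf g i j ≠ 0 ∧ idxN m (valOf g i j) = k
            then ((if j + 1 < (g.getD i []).length ∧ (g.getD i []).getD (j+1) 0 = valOf g i j
                    then (1:Int) else 0)
                + (if i + 1 < g.length ∧ j < (g.getD (i+1) []).length ∧ (g.getD (i+1) []).getD j 0 = valOf g i j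
                    then (1:Int) else 0)) else 0))
    (fun acc i ha hi => (inner i hi acc ha).1)
    (fun acc i ha hi k hk => (inner i hi acc ha).2 k hk)
    (List.replicate m 0) (by simp)
  refine ⟨main.1, fun k hk => ?_⟩
  rw [main.2 k hk]
  simp

-- B's fold over a pair of lists splits into the two independent folds
lemma alt_decomp (g : List (List Int)) (nf : Int) :
    extract_area_perim_alt g nf =
      ((List.range g.length).foldl (fun acc i =>
        (List.range (g.getD i []).length).foldl (fun acc j =>
          let v := (g.getD i []).getD j 0
          if v ≠ 0 then pyAddAt acc v 1 else acc) acc)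
        (List.replicate (nf + 1).toNat 0),
      List.zipWith (fun a p => 4 * a - 2 * p)
        ((List.range g.length).foldl (fun acc i =>
          (List.range (g.getD i []).length).foldl (fun acc j =>
            let v := (g.getD i []).getD j 0
            if v ≠ 0 then pyAddAt acc v 1 else acc) acc)
          (List.replicate (nf + 1).toNat 0))
        ((List.range g.length).foldl (fun acc i =>
          (List.range (g.getD i []).length).foldl (fun acc j =>
            let v := (g.getD i []).getD j 0
            if v ≠ 0 then
              (if i + 1 < g.length ∧ j < (g.getD (i+1) []).length ∧ (g.getD (i+1) []).getD j 0 = v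
                then pyAddAt (if j + 1 < (g.getD i []).length ∧ (g.getD i []).getD (j+1) 0 = v
                  then pyAddAt acc v 1 else acc) v 1
                else (if j + 1 < (g.getD i []).length ∧ (g.getD i []).getD (j+1) 0 = v
                  then pyAddAt acc v 1 else acc))
            else acc) acc)
          (List.replicate (nf + 1).toNat 0))) := by
  unfold extract_area_perim_alt
  have hinner : ∀ i, (fun (st : List Int × List Int) (j : Nat) =>
      let v := (g.getD i []).getD j 0
      if v ≠ 0 then
        (pyAddAt st.1 v 1,
         let p := if j + 1 < (g.getD i []).length ∧ (g.getD i []).getD (j+1) 0 = v then pyAddAt st.2 v 1 else st.2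
         if i + 1 < g.length ∧ j < (g.getD (i+1) []).length ∧ (g.getD (i+1) []).getD j 0 = v
           then pyAddAt p v 1 else p)
      else st)
    = (fun (st : List Int × List Int) (j : Nat) =>
      ((fun (a : List Int) (j : Nat) =>
          let v := (g.getD i []).getD j 0
          if v ≠ 0 then pyAddAt a v 1 else a) st.1 j,
       (fun (p : List Int) (j : Nat) =>
          let v := (g.getD i []).getD j 0
          if v ≠ 0 then
            (if i + 1 < g.length ∧ j < (g.getD (i+1) []).length ∧ (g.getD (i+1) []).getD j 0 = v
              then pyAddAt (if j + 1 < (g.getD i []).length ∧ (g.getD i []).getD (j+1) 0 = v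
                then pyAddAt p v 1 else p) v 1
              else (if j + 1 < (g.getD i []).length ∧ (g.getD i []).getD (j+1) 0 = v
                then pyAddAt p v 1 else p))
          else p) st.2 j)) := by
    intro i
    funext st j
    dsimp only
    by_cases hv : (g.getD i []).getD j 0 ≠ 0
    · simp only [if_pos hv]
    · simp only [if_neg hv]
  have houter : (fun (st : List Int × List Int) (i : Nat) =>
      (List.range (g.getD i []).length).foldl (fun st j =>
        let v := (g.getD i []).getD j 0
        if v ≠ 0 then
          (pyAddAt st.1 v 1,
           let p := if j + 1 < (g.getD i []).length ∧ (g.getD i []).getD (j+1) 0 = v then pyAddAt st.2 v 1 else st.2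
           if i + 1 < g.length ∧ j < (g.getD (i+1) []).length ∧ (g.getD (i+1) []).getD j 0 = v
             then pyAddAt p v 1 else p)
        else st) st)
    = (fun (st : List Int × List Int) (i : Nat) =>
      ((fun (a : List Int) (i : Nat) =>
          (List.range (g.getD i []).length).foldl (fun acc j =>
            let v := (g.getD i []).getD j 0
            if v ≠ 0 then pyAddAt acc v 1 else acc) a) st.1 i,
       (fun (p : List Int) (i : Nat) =>
          (List.range (g.getD i []).length).foldl (fun acc j =>
            let v := (g.getD i []).getD j 0
            if v ≠ 0 then
              (if i + 1 < g.length ∧ j < (g.getD (i+1) []).length ∧ (g.getD (i+1) []).getD j 0 = v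
                then pyAddAt (if j + 1 < (g.getD i []).length ∧ (g.getD i []).getD (j+1) 0 = v
                  then pyAddAt acc v 1 else acc) v 1
                else (if j + 1 < (g.getD i []).length ∧ (g.getD i []).getD (j+1) 0 = v
                  then pyAddAt acc v 1 else acc))
            else acc) p) st.2 i)) := by
    funext st i
    rw [hinner i]
    exact PySem.List.foldl_prod_mk
      (fun (a : List Int) (j : Nat) =>
        let v := (g.getD i []).getD j 0
        if v ≠ 0 then pyAddAt a v 1 else a)
      (fun (p : List Int) (j : Nat) =>
        let v := (g.getD i []).getD j 0
        if v ≠ 0 then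
          (if i + 1 < g.length ∧ j < (g.getD (i+1) []).length ∧ (g.getD (i+1) []).getD j 0 = v
            then pyAddAt (if j + 1 < (g.getD i []).length ∧ (g.getD i []).getD (j+1) 0 = v
              then pyAddAt p v 1 else p) v 1
            else (if j + 1 < (g.getD i []).length ∧ (g.getD i []).getD (j+1) 0 = v
              then pyAddAt p v 1 else p))
        else p)
      (List.range (g.getD i []).length) st.1 st.2
  have hF := PySem.List.foldl_prod_mk
    (fun (a : List Int) (i : Nat) =>
      (List.range (g.getD i []).length).foldl (fun acc j =>
        let v := (g.getD i []).getD j 0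
        if v ≠ 0 then pyAddAt acc v 1 else acc) a)
    (fun (p : List Int) (i : Nat) =>
      (List.range (g.getD i []).length).foldl (fun acc j =>
        let v := (g.getD i []).getD j 0
        if v ≠ 0 then
          (if i + 1 < g.length ∧ j < (g.getD (i+1) []).length ∧ (g.getD (i+1) []).getD j 0 = v
            then pyAddAt (if j + 1 < (g.getD i []).length ∧ (g.getD i []).getD (j+1) 0 = v
              then pyAddAt acc v 1 else acc) v 1
            else (if j + 1 < (g.getD i []).length ∧ (g.getD i []).getD (j+1) 0 = v
              then pyAddAt acc v 1 else acc))
        else acc) p)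
    (List.range g.length) (List.replicate (nf + 1).toNat 0) (List.replicate (nf + 1).toNat 0)
  dsimp only
  rw [houter, hF]


lemma vert_shift (n : Nat) (L : Nat → Nat) (D : Nat → Nat → Int)
    (hD : ∀ i j, D i j ≠ 0 → i + 1 < n ∧ j < L i ∧ j < L (i+1)) :
    ∑ i ∈ Finset.range n, ∑ j ∈ Finset.range (L i), (if 0 < i then D (i-1) j else 0)
      = ∑ i ∈ Finset.range n, ∑ j ∈ Finset.range (L i), D i j := by
  cases n with
  | zero => rfl
  | succ t =>
    rw [Finset.sum_range_succ' (fun i => ∑ j ∈ Finset.range (L i), (if 0 < i then D (i-1) j else 0)) t,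
      Finset.sum_range_succ (fun i => ∑ j ∈ Finset.range (L i), D i j) t]
    have hlast : ∑ j ∈ Finset.range (L t), D t j = 0 :=
      Finset.sum_eq_zero (fun j _ => by
        by_contra h
        exact absurd (hD t j h).1 (by omega))
    rw [hlast, add_zero]
    have h0 : ∑ j ∈ Finset.range (L 0), (if 0 < 0 then D (0-1) j else 0) = 0 := by simp
    rw [h0, add_zero]
    refine Finset.sum_congr rfl (fun i hi => ?_)
    have hstep : ∀ j ∈ Finset.range (L (i+1)), (if 0 < i + 1 then D (i+1-1) j else 0) = D i j := by
      intro j _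
      simp
    rw [Finset.sum_congr rfl hstep]
    exact sum_indicator_range_eq (fun j hj => ⟨(hD i j hj).2.2, (hD i j hj).2.1⟩)

lemma horiz_sum (g : List (List Int)) (m k i : Nat) :
    ∑ j ∈ Finset.range ((g.getD i []).length),
      (if (valOf g i j ≠ 0 ∧ idxN m (valOf g i j) = k) ∧ 0 < j ∧ (g.getD i []).getD (j-1) 0 = valOf g i j
        then (1:Int) else 0)
  = ∑ j ∈ Finset.range ((g.getD i []).length),
      (if (valOf g i j ≠ 0 ∧ idxN m (valOf g i j) = k) ∧ j + 1 < (g.getD i []).length ∧ (g.getD i []).getD (j+1) 0 = valOf g i j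
        then (1:Int) else 0) := by
  have hcongr : ∀ j ∈ Finset.range ((g.getD i []).length),
      (if (valOf g i j ≠ 0 ∧ idxN m (valOf g i j) = k) ∧ 0 < j ∧ (g.getD i []).getD (j-1) 0 = valOf g i j
        then (1:Int) else 0)
      = (if 0 < j ∧ ((valOf g i (j-1) ≠ 0 ∧ idxN m (valOf g i (j-1)) = k) ∧ (j-1) + 1 < (g.getD i []).length ∧ (g.getD i []).getD ((j-1)+1) 0 = valOf g i (j-1))
        then (1:Int) else 0) := by
    intro j hj
    rw [Finset.mem_range] at hj
    refine if_congr ?_ rfl rfl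
    constructor
    · rintro ⟨⟨hne, hidx⟩, hj0, heq⟩
      have hjj : j - 1 + 1 = j := by omega
      have hv : valOf g i (j-1) = valOf g i j := heq
      refine ⟨hj0, ⟨by rw [hv]; exact hne, by rw [hv]; exact hidx⟩, by rw [hjj]; exact hj, ?_⟩
      rw [hjj, hv]
    · rintro ⟨hj0, ⟨hne, hidx⟩, hlt, heq⟩
      have hjj : j - 1 + 1 = j := by omega
      rw [hjj] at heq
      have hv : valOf g i j = valOf g i (j-1) := heq
      exact ⟨⟨by rw [hv]; exact hne, by rw [hv]; exact hidx⟩, hj0, hv.symm⟩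
  rw [Finset.sum_congr rfl hcongr]
  have := shift_row ((g.getD i []).length)
    (fun j => (valOf g i j ≠ 0 ∧ idxN m (valOf g i j) = k) ∧ j + 1 < (g.getD i []).length ∧ (g.getD i []).getD (j+1) 0 = valOf g i j)
    (fun j h => h.2.1)
  exact this

lemma vert_sum (g : List (List Int)) (m k : Nat) :
    ∑ i ∈ Finset.range g.length, ∑ j ∈ Finset.range ((g.getD i []).length),
      (if (valOf g i j ≠ 0 ∧ idxN m (valOf g i j) = k) ∧ 0 < i ∧ (g.getD (i-1) []).getD j 0 = valOf g i j
        then (1:Int) else 0)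
  = ∑ i ∈ Finset.range g.length, ∑ j ∈ Finset.range ((g.getD i []).length),
      (if (valOf g i j ≠ 0 ∧ idxN m (valOf g i j) = k) ∧ i + 1 < g.length ∧ j < (g.getD (i+1) []).length ∧ (g.getD (i+1) []).getD j 0 = valOf g i j
        then (1:Int) else 0) := by
  have hcongr : ∀ i ∈ Finset.range g.length, ∀ j ∈ Finset.range ((g.getD i []).length),
      (if (valOf g i j ≠ 0 ∧ idxN m (valOf g i j) = k) ∧ 0 < i ∧ (g.getD (i-1) []).getD j 0 = valOf g i j
        then (1:Int) else 0)
      = (if 0 < i then (fun x j => (if (valOf g x j ≠ 0 ∧ idxN m (valOf g x j) = k) ∧ x + 1 < g.length ∧ j < (g.getD (x+1) []).length ∧ (g.getD (x+1) []).getD j 0 = valOf g x j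
          then (1:Int) else 0)) (i-1) j else 0) := by
    intro i hi j hj
    rw [Finset.mem_range] at hi hj
    by_cases h0 : 0 < i
    · rw [if_pos h0]
      have hii : i - 1 + 1 = i := by omega
      refine if_congr ?_ rfl rfl
      constructor
      · rintro ⟨⟨hne, hidx⟩, _, heq⟩
        have hv : valOf g (i-1) j = valOf g i j := heq
        refine ⟨⟨by rw [hv]; exact hne, by rw [hv]; exact hidx⟩, by rw [hii]; exact hi, by rw [hii]; exact hj, ?_⟩
        rw [hii, hv]
      · rintro ⟨⟨hne, hidx⟩, _, _, heq⟩
        rw [hii] at heq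
        have hv : valOf g i j = valOf g (i-1) j := heq
        exact ⟨⟨by rw [hv]; exact hne, by rw [hv]; exact hidx⟩, h0, hv.symm⟩
    · rw [if_neg h0, if_neg (by tauto)]
  rw [Finset.sum_congr rfl (fun i hi => Finset.sum_congr rfl (fun j hj => hcongr i hi j hj))]
  have hD : ∀ i j, (fun x j => (if (valOf g x j ≠ 0 ∧ idxN m (valOf g x j) = k) ∧ x + 1 < g.length ∧ j < (g.getD (x+1) []).length ∧ (g.getD (x+1) []).getD j 0 = valOf g x j
          then (1:Int) else 0)) i j ≠ 0 →
      i + 1 < g.length ∧ j < (g.getD i []).length ∧ j < (g.getD (i+1) []).length := by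
    intro i j h
    have h2 : (if (valOf g i j ≠ 0 ∧ idxN m (valOf g i j) = k) ∧ i + 1 < g.length ∧ j < (g.getD (i+1) []).length ∧ (g.getD (i+1) []).getD j 0 = valOf g i j then (1:Int) else 0) ≠ 0 := h
    have hc : (valOf g i j ≠ 0 ∧ idxN m (valOf g i j) = k) ∧ i + 1 < g.length ∧ j < (g.getD (i+1) []).length ∧ (g.getD (i+1) []).getD j 0 = valOf g i j := by
      by_contra hc
      rw [if_neg hc] at h2
      exact h2 rfl
    exact ⟨hc.2.1, valOf_ne_zero_lt hc.1.1, hc.2.2.1⟩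
  exact vert_shift g.length (fun i => (g.getD i []).length) _ hD

lemma main_identity (g : List (List Int)) (m k : Nat) :
    (∑ i ∈ Finset.range g.length, ∑ j ∈ Finset.range ((g.getD i []).length),
      (if valOf g i j ≠ 0 ∧ idxN m (valOf g i j) = k then 4 - numofneighbour g i j (valOf g i j) else 0))
  = 4 * (∑ i ∈ Finset.range g.length, ∑ j ∈ Finset.range ((g.getD i []).length),
      (if valOf g i j ≠ 0 ∧ idxN m (valOf g i j) = k then (1:Int) else 0))
  - 2 * (∑ i ∈ Finset.range g.length, ∑ j ∈ Finset.range ((g.getD i []).length),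
      (if valOf g i j ≠ 0 ∧ idxN m (valOf g i j) = k
        then ((if j + 1 < (g.getD i []).length ∧ (g.getD i []).getD (j+1) 0 = valOf g i j
                then (1:Int) else 0)
            + (if i + 1 < g.length ∧ j < (g.getD (i+1) []).length ∧ (g.getD (i+1) []).getD j 0 = valOf g i j
                then (1:Int) else 0)) else 0)) := by
  have hdecomp : ∀ i j,
      (if valOf g i j ≠ 0 ∧ idxN m (valOf g i j) = k then 4 - numofneighbour g i j (valOf g i j) else 0)
      = 4 * (if valOf g i j ≠ 0 ∧ idxN m (valOf g i j) = k then (1:Int) else 0)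
        - (if (valOf g i j ≠ 0 ∧ idxN m (valOf g i j) = k) ∧ 0 < i ∧ (g.getD (i-1) []).getD j 0 = valOf g i j then (1:Int) else 0)
        - (if (valOf g i j ≠ 0 ∧ idxN m (valOf g i j) = k) ∧ 0 < j ∧ (g.getD i []).getD (j-1) 0 = valOf g i j then (1:Int) else 0)
        - (if (valOf g i j ≠ 0 ∧ idxN m (valOf g i j) = k) ∧ i < g.length - 1 ∧ (g.getD (i+1) []).getD j 0 = valOf g i j then (1:Int) else 0)
        - (if (valOf g i j ≠ 0 ∧ idxN m (valOf g i j) = k) ∧ j < (g.getD i []).length - 1 ∧ (g.getD i []).getD (j+1) 0 = valOf g i j then (1:Int) else 0) := by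
    intro i j
    by_cases hC : valOf g i j ≠ 0 ∧ idxN m (valOf g i j) = k
    · obtain ⟨h1, h2⟩ := hC
      simp only [numofneighbour, h1, h2, ne_eq, not_false_eq_true, true_and, if_true, and_true]
      ring
    · rw [if_neg hC, if_neg hC, if_neg (by tauto), if_neg (by tauto), if_neg (by tauto), if_neg (by tauto)]
      ring
  have hqdecomp : ∀ i j,
      (if valOf g i j ≠ 0 ∧ idxN m (valOf g i j) = k
        then ((if j + 1 < (g.getD i []).length ∧ (g.getD i []).getD (j+1) 0 = valOf g i j then (1:Int) else 0)
            + (if i + 1 < g.length ∧ j < (g.getD (i+1) []).length ∧ (g.getD (i+1) []).getD j 0 = valOf g i j then (1:Int) else 0)) else 0)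
      = (if (valOf g i j ≠ 0 ∧ idxN m (valOf g i j) = k) ∧ j + 1 < (g.getD i []).length ∧ (g.getD i []).getD (j+1) 0 = valOf g i j then (1:Int) else 0)
        + (if (valOf g i j ≠ 0 ∧ idxN m (valOf g i j) = k) ∧ i + 1 < g.length ∧ j < (g.getD (i+1) []).length ∧ (g.getD (i+1) []).getD j 0 = valOf g i j then (1:Int) else 0) := by
    intro i j
    by_cases hC : valOf g i j ≠ 0 ∧ idxN m (valOf g i j) = k
    · obtain ⟨h1, h2⟩ := hC
      simp only [h1, h2, ne_eq, not_false_eq_true, true_and, if_true, and_true]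
    · rw [if_neg hC, if_neg (by tauto), if_neg (by tauto)]
      ring
  have hdown : ∀ i j,
      (if (valOf g i j ≠ 0 ∧ idxN m (valOf g i j) = k) ∧ i < g.length - 1 ∧ (g.getD (i+1) []).getD j 0 = valOf g i j then (1:Int) else 0)
      = (if (valOf g i j ≠ 0 ∧ idxN m (valOf g i j) = k) ∧ i + 1 < g.length ∧ j < (g.getD (i+1) []).length ∧ (g.getD (i+1) []).getD j 0 = valOf g i j then (1:Int) else 0) := by
    intro i j
    refine if_congr ?_ rfl rfl
    constructor
    · rintro ⟨hC, hlt, heq⟩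
      have hne : valOf g (i+1) j ≠ 0 := by
        have : valOf g (i+1) j = valOf g i j := heq
        rw [this]; exact hC.1
      exact ⟨hC, by omega, valOf_ne_zero_lt hne, heq⟩
    · rintro ⟨hC, hlt, _, heq⟩
      exact ⟨hC, by omega, heq⟩
  have hright : ∀ i j,
      (if (valOf g i j ≠ 0 ∧ idxN m (valOf g i j) = k) ∧ j < (g.getD i []).length - 1 ∧ (g.getD i []).getD (j+1) 0 = valOf g i j then (1:Int) else 0)
      = (if (valOf g i j ≠ 0 ∧ idxN m (valOf g i j) = k) ∧ j + 1 < (g.getD i []).length ∧ (g.getD i []).getD (j+1) 0 = valOf g i j then (1:Int) else 0) := by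
    intro i j
    refine if_congr ?_ rfl rfl
    constructor
    · rintro ⟨hC, hlt, heq⟩; exact ⟨hC, by omega, heq⟩
    · rintro ⟨hC, hlt, heq⟩; exact ⟨hC, by omega, heq⟩
  calc
    (∑ i ∈ Finset.range g.length, ∑ j ∈ Finset.range ((g.getD i []).length),
      (if valOf g i j ≠ 0 ∧ idxN m (valOf g i j) = k then 4 - numofneighbour g i j (valOf g i j) else 0))
      = ∑ i ∈ Finset.range g.length, ∑ j ∈ Finset.range ((g.getD i []).length),
        (4 * (if valOf g i j ≠ 0 ∧ idxN m (valOf g i j) = k then (1:Int) else 0)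
        - (if (valOf g i j ≠ 0 ∧ idxN m (valOf g i j) = k) ∧ 0 < i ∧ (g.getD (i-1) []).getD j 0 = valOf g i j then (1:Int) else 0)
        - (if (valOf g i j ≠ 0 ∧ idxN m (valOf g i j) = k) ∧ 0 < j ∧ (g.getD i []).getD (j-1) 0 = valOf g i j then (1:Int) else 0)
        - (if (valOf g i j ≠ 0 ∧ idxN m (valOf g i j) = k) ∧ i < g.length - 1 ∧ (g.getD (i+1) []).getD j 0 = valOf g i j then (1:Int) else 0)
        - (if (valOf g i j ≠ 0 ∧ idxN m (valOf g i j) = k) ∧ j < (g.getD i []).length - 1 ∧ (g.getD i []).getD (j+1) 0 = valOf g i j then (1:Int) else 0)) := by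
        exact Finset.sum_congr rfl (fun i _ => Finset.sum_congr rfl (fun j _ => hdecomp i j))
    _ = 4 * (∑ i ∈ Finset.range g.length, ∑ j ∈ Finset.range ((g.getD i []).length),
          (if valOf g i j ≠ 0 ∧ idxN m (valOf g i j) = k then (1:Int) else 0))
        - (∑ i ∈ Finset.range g.length, ∑ j ∈ Finset.range ((g.getD i []).length),
          (if (valOf g i j ≠ 0 ∧ idxN m (valOf g i j) = k) ∧ 0 < i ∧ (g.getD (i-1) []).getD j 0 = valOf g i j then (1:Int) else 0))
        - (∑ i ∈ Finset.range g.length, ∑ j ∈ Finset.range ((g.getD i []).length),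
          (if (valOf g i j ≠ 0 ∧ idxN m (valOf g i j) = k) ∧ 0 < j ∧ (g.getD i []).getD (j-1) 0 = valOf g i j then (1:Int) else 0))
        - (∑ i ∈ Finset.range g.length, ∑ j ∈ Finset.range ((g.getD i []).length),
          (if (valOf g i j ≠ 0 ∧ idxN m (valOf g i j) = k) ∧ i < g.length - 1 ∧ (g.getD (i+1) []).getD j 0 = valOf g i j then (1:Int) else 0))
        - (∑ i ∈ Finset.range g.length, ∑ j ∈ Finset.range ((g.getD i []).length),
          (if (valOf g i j ≠ 0 ∧ idxN m (valOf g i j) = k) ∧ j < (g.getD i []).length - 1 ∧ (g.getD i []).getD (j+1) 0 = valOf g i j then (1:Int) else 0)) := by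
        simp only [Finset.sum_sub_distrib, Finset.mul_sum]
    _ = 4 * (∑ i ∈ Finset.range g.length, ∑ j ∈ Finset.range ((g.getD i []).length),
          (if valOf g i j ≠ 0 ∧ idxN m (valOf g i j) = k then (1:Int) else 0))
        - 2 * (∑ i ∈ Finset.range g.length, ∑ j ∈ Finset.range ((g.getD i []).length),
          (if valOf g i j ≠ 0 ∧ idxN m (valOf g i j) = k
            then ((if j + 1 < (g.getD i []).length ∧ (g.getD i []).getD (j+1) 0 = valOf g i j then (1:Int) else 0)
                + (if i + 1 < g.length ∧ j < (g.getD (i+1) []).length ∧ (g.getD (i+1) []).getD j 0 = valOf g i j then (1:Int) else 0)) else 0)) := by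
        rw [Finset.sum_congr rfl (fun i _ => Finset.sum_congr rfl (fun j _ => hqdecomp i j)),
          Finset.sum_congr rfl (fun i _ => Finset.sum_congr rfl (fun j _ => hdown i j)),
          Finset.sum_congr rfl (fun i _ => Finset.sum_congr rfl (fun j _ => hright i j)),
          vert_sum g m k,
          Finset.sum_congr rfl (fun i _ => horiz_sum g m k i)]
        simp only [Finset.sum_add_distrib]
        ring

-- ===== VERDICT (by name: the statement is the Claim_ definition above) =====
theorem extract_area_perim_spec : Claim_equal_extract_area_perim := by
  intro img nf _ hpre
  unfold Spec_extract_area_perim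
  obtain ⟨hlab, _⟩ := hpre
  have hv := val_bounds (g := img) (m := (nf + 1).toNat) hlab
  have hA := gridA_char img ((nf + 1).toNat) (fun _ _ => 1) hv
  have hP := gridA_char img ((nf + 1).toNat) (fun i j => 4 - numofneighbour img i j (valOf img i j)) hv
  have hQ := gridP_char img ((nf + 1).toNat) hv
  rw [alt_decomp]
  refine Prod.ext ?_ ?_
  · rfl
  · apply List.ext_getElem
    · have hlen : (extract_area_perim img nf).2.length = (nf + 1).toNat := hP.1
      rw [hlen, List.length_zipWith, hA.1, hQ.1]
      simp
    · intro k hk1 hk2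
      have hkm : k < (nf + 1).toNat := by
        have hlen : (extract_area_perim img nf).2.length = (nf + 1).toNat := hP.1
        rw [hlen] at hk1
        exact hk1
      rw [List.getElem_zipWith]
      have conv : ∀ (l : List Int) (hh : k < l.length), l[k]'hh = l.getD k 0 :=
        fun l hh => (List.getD_eq_getElem l 0 hh).symm
      simp only [conv]
      refine Eq.trans (hP.2 k hkm) ?_
      rw [hA.2 k hkm, hQ.2 k hkm]
      exact main_identity img ((nf + 1).toNat) k
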